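-- pv_equiv track=rewrite | github.com/orwithout/noj.nwpu | 50.DivideApple/50.solution-list.py | DivideApple
-- ===== SOURCE A (Python) =====
-- def DivideApple(m,n,k):
--     if m == 0:
--         return 1
--     if n == 0:
--         return 0
--     E=0
--     for i in range(k,m+1):
--         E += DivideApple(m-i,n-1,i)
--     return E
-- ===== SOURCE B (Python) =====
-- def DivideApple(m, n, k):
--     memo = {}
--
--     def go(m, n, k):
--         if m == 0:
--             return 1
--         if n == 0:
--             return 0
--         key = (m, n, k)
--         if key in memo:
--             return memo[key]
--         E = 0
--         for i in range(k, m + 1):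
--             E += go(m - i, n - 1, i)
--         memo[key] = E
--         return E
--
--     return go(m, n, k)
-- ===== Notes on version B (the rewrite author's own statement) =====
-- stated objective: alternative
-- what changed: B threads a memo dictionary on (m,n,k) through the recursion, so each distinct state is evaluated once and looked up afterwards instead of re-expanded.
-- outside the precondition, e.g. on DivideApple(1, 950, 0): A returns 950, B returns 950
import Mathlib
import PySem

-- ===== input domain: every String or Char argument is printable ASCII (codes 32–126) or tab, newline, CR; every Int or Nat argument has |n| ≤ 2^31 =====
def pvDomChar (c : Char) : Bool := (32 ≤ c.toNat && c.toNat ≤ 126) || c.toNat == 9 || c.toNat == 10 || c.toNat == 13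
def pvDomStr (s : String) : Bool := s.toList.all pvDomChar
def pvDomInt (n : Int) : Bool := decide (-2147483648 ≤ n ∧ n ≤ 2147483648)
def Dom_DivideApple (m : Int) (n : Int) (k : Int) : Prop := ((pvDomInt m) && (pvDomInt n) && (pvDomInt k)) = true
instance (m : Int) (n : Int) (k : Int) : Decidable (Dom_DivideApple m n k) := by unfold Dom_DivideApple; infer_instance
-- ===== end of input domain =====

-- B replaces A's plain recursive enumeration by a memoised recursion on (m,n,k) (alternative: each state is computed once and cached in a dictionary).

-- ===== PORT A =====
-- Fuel only makes the recursion total in Lean; on Pre_ inputs the recursion depth is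
-- at most n.toNat + m.toNat + 2, so the fuel is never exhausted there (see depth lemmas below).
def DivideAppleAux (fuel : Nat) (m : Int) (n : Int) (k : Int) : Int :=
  if m = 0 then 1
  else if n = 0 then 0
  else
    match fuel with
    | 0 => 0
    | fuel' + 1 =>
      (PySem.List.pyRange k (m + 1) 1).foldl
        (fun E i => E + DivideAppleAux fuel' (m - i) (n - 1) i) 0

def DivideApple (m : Int) (n : Int) (k : Int) : Int :=
  DivideAppleAux (n.toNat + m.toNat + 2) m n k

-- ===== PORT B =====
-- memoised recursion: go(m,n,k) with memo : dict[(m,n,k)] -> value, threaded through the fold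
def DivideAppleMemo (fuel : Nat) (memo : PySem.Dict (Int × Int × Int) Int) (m : Int) (n : Int) (k : Int) :
    Int × PySem.Dict (Int × Int × Int) Int :=
  if m = 0 then (1, memo)
  else if n = 0 then (0, memo)
  else
    match memo.get? (m, n, k) with
    | some v => (v, memo)
    | none =>
      match fuel with
      | 0 => (0, memo)
      | fuel' + 1 =>
        let p := (PySem.List.pyRange k (m + 1) 1).foldl
          (fun (s : Int × PySem.Dict (Int × Int × Int) Int) i =>
            let r := DivideAppleMemo fuel' s.2 (m - i) (n - 1) i
            (s.1 + r.1, r.2)) (0, memo)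
        (p.1, p.2.insert (m, n, k) p.1)

def DivideApple_alt (m : Int) (n : Int) (k : Int) : Int :=
  (DivideAppleMemo (n.toNat + m.toNat + 2) PySem.Dict.empty m n k).1

-- ===== PRECONDITION & SPEC =====
-- Pre_ admits exactly the inputs whose recursion depth is bounded (base case m=0; empty range m<k;
-- n counting down to 0 from at most 900; parts of size ≥ k ≥ 1 so at most m/k < 901 levels; the
-- one-step negative case k = m); on the excluded inputs the recursion is either unbounded or deeper
-- than ~900, where A's outcome (RecursionError vs a value) depends on the interpreter's stack limit
-- and the caller's stack depth, not on the input alone, or A's run is astronomically long (cited).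
def Pre_DivideApple (m : Int) (n : Int) (k : Int) : Prop :=
  m = 0 ∨ m < k ∨ (0 ≤ n ∧ n ≤ 900) ∨ (1 ≤ k ∧ m < 901 * k) ∨ (m < 0 ∧ k = m)
instance (m : Int) (n : Int) (k : Int) : Decidable (Pre_DivideApple m n k) := by
  unfold Pre_DivideApple; infer_instance

def pvWitness_DivideApple : Int × Int × Int := (7, 3, 1)

def Spec_DivideApple (m : Int) (n : Int) (k : Int) (out : Int) : Prop := out = DivideApple_alt m n k
instance (m : Int) (n : Int) (k : Int) (out : Int) : Decidable (Spec_DivideApple m n k out) := by unfold Spec_DivideApple; infer_instance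

-- ===== CLAIM (what is proved, stated in full; the proofs are below) =====
def Claim_equal_DivideApple : Prop := ∀ (m : Int) (n : Int) (k : Int), Dom_DivideApple m n k → Pre_DivideApple m n k → Spec_DivideApple m n k (DivideApple m n k)

-- ===== LEMMAS AND PROOFS =====

-- recursion-depth bound used by both ports' fuel arguments
def pvDepth (m : Int) (n : Int) : Nat :=
  if m = 0 then 1 else if 0 ≤ n then n.toNat + 1 else m.toNat + 2

lemma pvDepth_pos (m n : Int) : 1 ≤ pvDepth m n := by
  unfold pvDepth; split_ifs <;> omega

lemma pre_sub (m n k i : Int) (hg : Pre_DivideApple m n k) (hm : m ≠ 0) (hn : n ≠ 0)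
    (hi : i ∈ PySem.List.pyRange k (m + 1) 1) : Pre_DivideApple (m - i) (n - 1) i := by
  rw [PySem.List.mem_pyRange_one] at hi
  unfold Pre_DivideApple at *
  omega

lemma pvDepth_sub (m n k i : Int) (hg : Pre_DivideApple m n k) (hm : m ≠ 0) (hn : n ≠ 0)
    (hi : i ∈ PySem.List.pyRange k (m + 1) 1) : pvDepth (m - i) (n - 1) < pvDepth m n := by
  rw [PySem.List.mem_pyRange_one] at hi
  unfold Pre_DivideApple at hg
  unfold pvDepth
  split_ifs <;> omega

-- A's aux is independent of the fuel once the fuel covers the recursion depth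
lemma aux_stable : ∀ (fuel₁ fuel₂ : Nat) (m n k : Int), Pre_DivideApple m n k →
    pvDepth m n ≤ fuel₁ → pvDepth m n ≤ fuel₂ →
    DivideAppleAux fuel₁ m n k = DivideAppleAux fuel₂ m n k := by
  intro fuel₁
  induction fuel₁ with
  | zero => intro fuel₂ m n k _ h1 _; have := pvDepth_pos m n; omega
  | succ f ih =>
    intro fuel₂ m n k hg h1 h2
    have hd := pvDepth_pos m n
    obtain ⟨f₂, rfl⟩ : ∃ f₂, fuel₂ = f₂ + 1 := ⟨fuel₂ - 1, by omega⟩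
    by_cases hm : m = 0
    · simp [DivideAppleAux, hm]
    by_cases hn : n = 0
    · simp [DivideAppleAux, hm, hn]
    simp only [DivideAppleAux, if_neg hm, if_neg hn]
    refine PySem.List.foldl_congr_mem _ _ _ _ ?_
    intro E i hi
    have hg' := pre_sub m n k i hg hm hn hi
    have hd' := pvDepth_sub m n k i hg hm hn hi
    rw [ih f₂ (m - i) (n - 1) i hg' (by omega) (by omega)]

-- the canonical value of A's recursion
def pvF (m n k : Int) : Int := DivideAppleAux (pvDepth m n) m n k

lemma pvF_base_m (m n k : Int) (hm : m = 0) : pvF m n k = 1 := by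
  subst hm; unfold pvF DivideAppleAux; simp

lemma pvF_base_n (m n k : Int) (hm : m ≠ 0) (hn : n = 0) : pvF m n k = 0 := by
  subst hn; unfold pvF DivideAppleAux; simp [hm]

lemma pvF_unfold (m n k : Int) (hg : Pre_DivideApple m n k) (hm : m ≠ 0) (hn : n ≠ 0) :
    pvF m n k = (PySem.List.pyRange k (m + 1) 1).foldl
      (fun E i => E + pvF (m - i) (n - 1) i) 0 := by
  have hd := pvDepth_pos m n
  obtain ⟨d, hdd⟩ : ∃ d, pvDepth m n = d + 1 := ⟨pvDepth m n - 1, by omega⟩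
  unfold pvF
  rw [hdd]
  simp only [DivideAppleAux, if_neg hm, if_neg hn]
  refine PySem.List.foldl_congr_mem _ _ _ _ ?_
  intro E i hi
  have hg' := pre_sub m n k i hg hm hn hi
  have hd' := pvDepth_sub m n k i hg hm hn hi
  rw [aux_stable d (pvDepth (m - i) (n - 1)) (m - i) (n - 1) i hg' (by omega) (by omega)]

lemma A_eq_pvF (m n k : Int) (hg : Pre_DivideApple m n k) : DivideApple m n k = pvF m n k := by
  unfold DivideApple pvF
  refine aux_stable _ _ m n k hg ?_ ?_ <;> (unfold pvDepth; split_ifs <;> omega)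

-- memo invariant: every stored value is the canonical value at its key
def pvInv (memo : PySem.Dict (Int × Int × Int) Int) : Prop :=
  ∀ q v, memo.get? q = some v → v = pvF q.1 q.2.1 q.2.2

lemma pvInv_empty : pvInv PySem.Dict.empty := by
  intro q v h
  simp [PySem.Dict.empty, PySem.Dict.get?] at h

lemma pvInv_insert (memo : PySem.Dict (Int × Int × Int) Int) (hI : pvInv memo)
    (q : Int × Int × Int) (v : Int) (hv : v = pvF q.1 q.2.1 q.2.2) :
    pvInv (memo.insert q v) := by
  intro q' v' h
  by_cases hq : q' = q
  · subst hq
    rw [PySem.Dict.get?_insert_self] at h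
    cases h; exact hv
  · rw [PySem.Dict.get?_insert_of_ne _ _ hq] at h
    exact hI q' v' h

-- B's memoised recursion computes the canonical value and preserves the invariant
lemma memo_correct : ∀ (fuel : Nat) (m n k : Int) (memo : PySem.Dict (Int × Int × Int) Int),
    Pre_DivideApple m n k → pvDepth m n ≤ fuel → pvInv memo →
    (DivideAppleMemo fuel memo m n k).1 = pvF m n k ∧ pvInv (DivideAppleMemo fuel memo m n k).2 := by
  intro fuel
  induction fuel with
  | zero => intro m n k memo _ h1 _; have := pvDepth_pos m n; omega
  | succ f ih =>
    intro m n k memo hg h1 hI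
    by_cases hm : m = 0
    · simp only [DivideAppleMemo, if_pos hm]
      exact ⟨(pvF_base_m m n k hm).symm, hI⟩
    by_cases hn : n = 0
    · simp only [DivideAppleMemo, if_neg hm, if_pos hn]
      exact ⟨(pvF_base_n m n k hm hn).symm, hI⟩
    simp only [DivideAppleMemo, if_neg hm, if_neg hn]
    cases hget : memo.get? (m, n, k) with
    | some v => exact ⟨hI (m, n, k) v hget, hI⟩
    | none =>
      -- the fold over the range, with the invariant threaded through
      have fold :
          ∀ (l : List Int), (∀ i ∈ l, i ∈ PySem.List.pyRange k (m + 1) 1) →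
          ∀ (E : Int) (d : PySem.Dict (Int × Int × Int) Int), pvInv d →
          (l.foldl (fun (s : Int × PySem.Dict (Int × Int × Int) Int) i =>
              let r := DivideAppleMemo f s.2 (m - i) (n - 1) i
              (s.1 + r.1, r.2)) (E, d)).1
            = l.foldl (fun E i => E + pvF (m - i) (n - 1) i) E ∧
          pvInv (l.foldl (fun (s : Int × PySem.Dict (Int × Int × Int) Int) i =>
              let r := DivideAppleMemo f s.2 (m - i) (n - 1) i
              (s.1 + r.1, r.2)) (E, d)).2 := by
        intro l
        induction l with
        | nil => intro _ E d hd; exact ⟨rfl, hd⟩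
        | cons i t iht =>
          intro hmem E d hd
          have hi := hmem i (by simp)
          have hg' := pre_sub m n k i hg hm hn hi
          have hd' := pvDepth_sub m n k i hg hm hn hi
          obtain ⟨hv, hinv⟩ := ih (m - i) (n - 1) i d hg' (by omega) hd
          simp only [List.foldl_cons]
          rw [← hv]
          exact iht (fun j hj => hmem j (by simp [hj]))
            (E + (DivideAppleMemo f d (m - i) (n - 1) i).1)
            (DivideAppleMemo f d (m - i) (n - 1) i).2 hinv
      obtain ⟨hv, hinv⟩ := fold (PySem.List.pyRange k (m + 1) 1) (fun _ h => h) 0 memo hI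
      refine ⟨?_, ?_⟩
      · rw [hv, pvF_unfold m n k hg hm hn]
      · exact pvInv_insert _ hinv (m, n, k) _ (by rw [hv, pvF_unfold m n k hg hm hn])

lemma B_eq_pvF (m n k : Int) (hg : Pre_DivideApple m n k) : DivideApple_alt m n k = pvF m n k := by
  unfold DivideApple_alt
  exact (memo_correct _ m n k PySem.Dict.empty hg (by unfold pvDepth; split_ifs <;> omega) pvInv_empty).1

-- ===== VERDICT (by name: the statement is the Claim_ definition above) =====
theorem DivideApple_spec : Claim_equal_DivideApple := by
  intro m n k _ hpre
  unfold Spec_DivideApple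
  rw [A_eq_pvF m n k hpre, B_eq_pvF m n k hpre]
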